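-- pv_equiv track=rewrite | github.com/521minsu/BarcodeDetectorGUI | CS373_barcode_detection.py | applyErosion
-- ===== SOURCE A (Python) =====
-- def createInitializedGreyscalePixelArray(image_width, image_height, initValue=0):
--     new_array = [[initValue for x in range(image_width)] for y in range(image_height)]
--     return new_array
--
-- def applyErosion(pixel_array, image_width, image_height):
--     result = createInitializedGreyscalePixelArray(image_width, image_height)
--
--     for h in range(2, image_height - 2):
--         for w in range(2, image_width - 2):
--             value = 255
--             for fh in range(5):
--                 for fw in range(5):
--                     value = min(value, pixel_array[h + fh - 2][w + fw - 2])
--             if (value != 0):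
--                 result[h][w] = 255
--             else:
--                 result[h][w] = 0
--     return result
-- ===== SOURCE B (Python) =====
-- def applyErosion(pixel_array, image_width, image_height):
--     # Separable 5x5 min filter: a horizontal 5-min pass, then a vertical 5-min
--     # over the intermediate array; output rows are built directly by
--     # comprehensions instead of initializing and mutating an array.
--     if image_height < 5 or image_width < 5:
--         return [[0 for _ in range(image_width)] for _ in range(image_height)]
--     horiz = [[(min(pixel_array[h][w - 2], pixel_array[h][w - 1], pixel_array[h][w],
--                    pixel_array[h][w + 1], pixel_array[h][w + 2])
--                if 2 <= w <= image_width - 3 else 0)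
--               for w in range(image_width)]
--              for h in range(image_height)]
--     return [[(255 if min(255, horiz[h - 2][w], horiz[h - 1][w], horiz[h][w],
--                          horiz[h + 1][w], horiz[h + 2][w]) != 0 else 0)
--               if (2 <= h <= image_height - 3 and 2 <= w <= image_width - 3) else 0
--              for w in range(image_width)]
--             for h in range(image_height)]
-- ===== Notes on version B (the rewrite author's own statement) =====
-- stated objective: alternative
-- what changed: Replaces the per-pixel 5x5 scan (25 reads per pixel) with a separable min filter: a horizontal 5-wide min pass into an intermediate array followed by a vertical 5-tall min pass, building the output rows by comprehensions instead of mutating an initialized array.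
import Mathlib
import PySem

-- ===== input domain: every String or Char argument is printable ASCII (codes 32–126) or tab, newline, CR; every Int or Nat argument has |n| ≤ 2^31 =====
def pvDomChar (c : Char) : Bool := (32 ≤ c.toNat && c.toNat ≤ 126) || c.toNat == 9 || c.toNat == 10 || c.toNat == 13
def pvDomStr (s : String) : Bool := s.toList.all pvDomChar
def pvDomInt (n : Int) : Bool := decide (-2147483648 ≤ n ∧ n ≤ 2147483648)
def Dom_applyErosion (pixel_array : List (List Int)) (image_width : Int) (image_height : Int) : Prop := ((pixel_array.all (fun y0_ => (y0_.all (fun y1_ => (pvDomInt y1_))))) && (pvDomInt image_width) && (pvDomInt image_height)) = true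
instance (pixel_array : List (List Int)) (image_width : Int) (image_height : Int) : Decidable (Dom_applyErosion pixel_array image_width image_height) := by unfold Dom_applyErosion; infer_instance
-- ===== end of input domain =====

-- B replaces A's per-pixel 5x5 scan by a separable min filter (horizontal 5-min pass, then
-- vertical 5-min pass), building output rows by comprehensions instead of mutating an array.
-- Both ports use pyGetD/pySetD (default on out-of-range); exact on Pre_ (all indices in range).


-- ===== PORT A =====
-- pixel_array[a][b] ported as nested pyGetD (default 0); in range whenever Pre_ holds.
def pvGet (pixel_array : List (List Int)) (a b : Int) : Int :=
  PySem.List.pyGetD (PySem.List.pyGetD pixel_array a []) b 0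

def createInitializedGreyscalePixelArray (image_width image_height : Int) (initValue : Int) : List (List Int) :=
  (PySem.List.pyRange 0 image_height 1).map (fun _ =>
    (PySem.List.pyRange 0 image_width 1).map (fun _ => initValue))

def applyErosion (pixel_array : List (List Int)) (image_width : Int) (image_height : Int) : List (List Int) :=
  let result := createInitializedGreyscalePixelArray image_width image_height 0
  (PySem.List.pyRange 2 (image_height - 2) 1).foldl (fun result h =>
    (PySem.List.pyRange 2 (image_width - 2) 1).foldl (fun result w =>
      let value := (PySem.List.pyRange 0 5 1).foldl (fun value fh =>
        (PySem.List.pyRange 0 5 1).foldl (fun value fw =>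
          min value (pvGet pixel_array (h + fh - 2) (w + fw - 2))) value) 255
      PySem.List.pySetD result h
        (PySem.List.pySetD (PySem.List.pyGetD result h []) w
          (if value ≠ 0 then 255 else 0))) result) result

-- ===== PORT B =====
def applyErosion_alt (pixel_array : List (List Int)) (image_width : Int) (image_height : Int) : List (List Int) :=
  if image_height < 5 ∨ image_width < 5 then
    (PySem.List.pyRange 0 image_height 1).map (fun _ =>
      (PySem.List.pyRange 0 image_width 1).map (fun _ => (0 : Int)))
  else
    let horiz := (PySem.List.pyRange 0 image_height 1).map (fun h =>
      (PySem.List.pyRange 0 image_width 1).map (fun w =>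
        if 2 ≤ w ∧ w ≤ image_width - 3 then
          min (pvGet pixel_array h (w - 2)) (min (pvGet pixel_array h (w - 1))
            (min (pvGet pixel_array h w) (min (pvGet pixel_array h (w + 1))
              (pvGet pixel_array h (w + 2)))))
        else 0))
    (PySem.List.pyRange 0 image_height 1).map (fun h =>
      (PySem.List.pyRange 0 image_width 1).map (fun w =>
        if 2 ≤ h ∧ h ≤ image_height - 3 ∧ 2 ≤ w ∧ w ≤ image_width - 3 then
          let hzd := fun a => PySem.List.pyGetD (PySem.List.pyGetD horiz a []) w 0
          let m := min 255 (min (hzd (h - 2)) (min (hzd (h - 1))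
            (min (hzd h) (min (hzd (h + 1)) (hzd (h + 2))))))
          if m ≠ 0 then 255 else 0
        else 0))

-- ===== PRECONDITION & SPEC =====
-- Pre_ excludes exactly the inputs where Python A raises IndexError: whenever the 5x5 window is
-- ever read (both dimensions ≥ 5), pixel_array must have image_height rows of length ≥ image_width.
def Pre_applyErosion (pixel_array : List (List Int)) (image_width : Int) (image_height : Int) : Prop :=
  (5 ≤ image_height ∧ 5 ≤ image_width) →
    (image_height ≤ pixel_array.length ∧
      ∀ row ∈ pixel_array.take image_height.toNat, image_width ≤ row.length)
instance (pixel_array : List (List Int)) (image_width : Int) (image_height : Int) : Decidable (Pre_applyErosion pixel_array image_width image_height) := by unfold Pre_applyErosion; infer_instance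

def pvWitness_applyErosion : List (List Int) × Int × Int :=
  ([[0,1,2,3,4],[5,0,255,1,2],[1,2,3,4,5],[9,8,7,6,5],[1,1,1,1,1]], 5, 5)

def Spec_applyErosion (pixel_array : List (List Int)) (image_width : Int) (image_height : Int) (out : List (List Int)) : Prop := out = applyErosion_alt pixel_array image_width image_height
instance (pixel_array : List (List Int)) (image_width : Int) (image_height : Int) (out : List (List Int)) : Decidable (Spec_applyErosion pixel_array image_width image_height out) := by unfold Spec_applyErosion; infer_instance

-- ===== CLAIM (what is proved, stated in full; the proofs are below) =====
def Claim_equal_applyErosion : Prop := ∀ (pixel_array : List (List Int)) (image_width : Int) (image_height : Int), Dom_applyErosion pixel_array image_width image_height → Pre_applyErosion pixel_array image_width image_height → Spec_applyErosion pixel_array image_width image_height (applyErosion pixel_array image_width image_height)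

-- ===== LEMMAS AND PROOFS =====

-- element of a pyRange-comprehension row
theorem getElem?_map_pyRange_zero' {α : Type} (f : Int → α) (n : Int) (k : Nat) :
    ((PySem.List.pyRange 0 n 1).map f)[k]? = if (k : Int) < n then some (f k) else none := by
  by_cases hk : k < (PySem.List.pyRange 0 n 1).length
  · rw [List.getElem?_map, List.getElem?_eq_getElem hk]
    have := PySem.List.getElem_pyRange_one (a := 0) (b := n) (k := k) (h := by simpa using hk)
    rw [PySem.List.length_pyRange_one] at hk
    simp [this, show (k : Int) < n by omega]
  · rw [List.getElem?_eq_none (by simpa using hk)]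
    rw [PySem.List.length_pyRange_one] at hk
    simp [show ¬ (k : Int) < n by omega]

-- the inner w-loop: repeated pySetD at nonnegative indices with values independent of the state
theorem foldl_pySetD_getElem? (ws : List Int) (g : Int → Int) (row : List Int)
    (hnn : ∀ w ∈ ws, 0 ≤ w) (j : Nat) :
    (ws.foldl (fun row w => PySem.List.pySetD row w (g w)) row)[j]?
      = if (j : Int) ∈ ws then (if j < row.length then some (g j) else none) else row[j]? := by
  induction ws generalizing row with
  | nil => simp
  | cons w rest ih =>
    have hw : 0 ≤ w := hnn w (by simp)
    have hrest : ∀ x ∈ rest, 0 ≤ x := fun x hx => hnn x (by simp [hx])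
    simp only [List.foldl_cons]
    rw [ih _ hrest]
    rw [PySem.List.pySetD_of_nonneg _ _ hw]
    by_cases hjr : (j : Int) ∈ rest
    · rw [if_pos hjr, if_pos (List.mem_cons_of_mem _ hjr), List.length_set]
    · by_cases hjw : (j : Int) = w
      · have hwn : w.toNat = j := by omega
        rw [if_neg hjr, if_pos (by simp [← hjw])]
        subst hwn
        by_cases hlt : w.toNat < row.length
        · rw [List.getElem?_set_self hlt, if_pos hlt, hjw]
        · rw [List.set_eq_of_length_le (by omega), List.getElem?_eq_none (by omega), if_neg hlt]
      · have hne : w.toNat ≠ j := by omega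
        rw [List.getElem?_set_ne hne]
        simp [hjr, hjw]

-- effect of the inner w-loop on the whole matrix: it only rewrites row h
theorem inner_effect (ws : List Int) (h : Int) (hh : 0 ≤ h) (v : Int → Int)
    (r : List (List Int)) (k : Nat) :
    (ws.foldl (fun r w =>
        PySem.List.pySetD r h
          (PySem.List.pySetD (PySem.List.pyGetD r h []) w (v w))) r)[k]?
      = if (k : Int) = h then
          (r[k]?).map (fun row => ws.foldl (fun row w => PySem.List.pySetD row w (v w)) row)
        else r[k]? := by
  induction ws generalizing r with
  | nil => split <;> simp_all
  | cons w ws ih =>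
    simp only [List.foldl_cons]
    rw [ih]
    rw [PySem.List.pySetD_of_nonneg _ _ hh, PySem.List.pyGetD_of_nonneg _ _ hh]
    by_cases hk : (k : Int) = h
    · have hkn : h.toNat = k := by omega
      subst hkn
      by_cases hlt : h.toNat < r.length
      · rw [if_pos hk, if_pos hk, List.getElem?_set_self hlt,
          List.getD_eq_getElem?_getD, List.getElem?_eq_getElem hlt]
        simp
      · rw [List.set_eq_of_length_le (by omega), if_pos hk, if_pos hk,
          List.getElem?_eq_none (by omega)]
        simp
    · have hne : h.toNat ≠ k := by omega
      rw [if_neg hk, if_neg hk, List.getElem?_set_ne hne]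

-- the h-loop: any step that only rewrites row h, over distinct nonnegative h's
theorem foldl_rows_getElem? (hs : List Int) (F : Int → List (List Int) → List (List Int))
    (upd : Int → List Int → List Int)
    (hF : ∀ h r (k : Nat), 0 ≤ h →
      (F h r)[k]? = if (k : Int) = h then (r[k]?).map (upd h) else r[k]?)
    (r : List (List Int)) (hnn : ∀ h ∈ hs, 0 ≤ h) (hnd : hs.Nodup) (i : Nat) :
    (hs.foldl (fun r h => F h r) r)[i]?
      = if (i : Int) ∈ hs then (r[i]?).map (upd i) else r[i]? := by
  induction hs generalizing r with
  | nil => simp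
  | cons h rest ih =>
    have hh : 0 ≤ h := hnn h (by simp)
    have hnotin : h ∉ rest := (List.nodup_cons.mp hnd).1
    simp only [List.foldl_cons]
    rw [ih _ (fun x hx => hnn x (by simp [hx])) (List.nodup_cons.mp hnd).2]
    rw [hF h r i hh]
    by_cases hir : (i : Int) ∈ rest
    · rw [if_neg (show ¬((i : Int) = h) from fun he => hnotin (by rw [← he]; exact hir)),
        if_pos hir, if_pos (List.mem_cons_of_mem _ hir)]
    · by_cases hih : (i : Int) = h
      · rw [if_pos hih, if_neg hir, if_pos (by simp [hih]), hih]
      · rw [if_neg hih, if_neg hir, if_neg (by simp [hih, hir])]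

-- canonical 5-wide horizontal minimum (the value B's horiz array stores)
def hmin5 (pa : List (List Int)) (a j : Int) : Int :=
  min (pvGet pa a (j - 2)) (min (pvGet pa a (j - 1))
    (min (pvGet pa a j) (min (pvGet pa a (j + 1)) (pvGet pa a (j + 2)))))

-- A's 25-fold minimum regrouped as the separable form
theorem valA_eq (pa : List (List Int)) (i j : Int) :
    ((PySem.List.pyRange 0 5 1).foldl (fun value fh =>
        (PySem.List.pyRange 0 5 1).foldl (fun value fw =>
          min value (pvGet pa (i + fh - 2) (j + fw - 2))) value) 255)
      = min 255 (min (hmin5 pa (i - 2) j) (min (hmin5 pa (i - 1) j)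
          (min (hmin5 pa i j) (min (hmin5 pa (i + 1) j) (hmin5 pa (i + 2) j))))) := by
  have h5 : PySem.List.pyRange 0 5 1 = [0, 1, 2, 3, 4] := by decide
  have e0 : ∀ x : Int, x + 0 - 2 = x - 2 := by intro x; ring
  have e1 : ∀ x : Int, x + 1 - 2 = x - 1 := by intro x; ring
  have e2 : ∀ x : Int, x + 2 - 2 = x := by intro x; ring
  have e3 : ∀ x : Int, x + 3 - 2 = x + 1 := by intro x; ring
  have e4 : ∀ x : Int, x + 4 - 2 = x + 2 := by intro x; ring
  simp only [h5, List.foldl_cons, List.foldl_nil, hmin5, e0, e1, e2, e3, e4, min_assoc]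

-- a constant comprehension row, indexed
theorem zrow_getElem? (W : Int) (j : Nat) :
    ((PySem.List.pyRange 0 W 1).map (fun _ => (0 : Int)))[j]?
      = if (j : Int) < W then some 0 else none :=
  getElem?_map_pyRange_zero' _ W j

theorem foldl_id {α β : Type} (l : List α) (r : β) : l.foldl (fun r _ => r) r = r := by
  induction l <;> simp_all

theorem AB_eq (pixel_array : List (List Int)) (image_width image_height : Int) :
    applyErosion pixel_array image_width image_height
      = applyErosion_alt pixel_array image_width image_height := by
  by_cases hsmall : image_height < 5 ∨ image_width < 5
  · rw [applyErosion_alt, if_pos hsmall]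
    rw [applyErosion, createInitializedGreyscalePixelArray]
    rcases hsmall with hH | hW
    · rw [PySem.List.pyRange_one_eq_nil (by omega : image_height - 2 ≤ 2)]
      rfl
    · rw [PySem.List.pyRange_one_eq_nil (by omega : image_width - 2 ≤ 2)]
      simp only [List.foldl_nil, foldl_id]
  · rw [not_or, not_lt, not_lt] at hsmall
    obtain ⟨hH5, hW5⟩ := hsmall
    rw [applyErosion, applyErosion_alt, createInitializedGreyscalePixelArray,
      if_neg (by omega)]
    apply List.ext_getElem?
    intro i
    rw [foldl_rows_getElem? _ _
        (fun h row => (PySem.List.pyRange 2 (image_width - 2) 1).foldl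
          (fun row w => PySem.List.pySetD row w
            (if ((PySem.List.pyRange 0 5 1).foldl (fun value fh =>
              (PySem.List.pyRange 0 5 1).foldl (fun value fw =>
                min value (pvGet pixel_array (h + fh - 2) (w + fw - 2))) value) 255) ≠ 0
             then 255 else 0)) row)
        (fun h r k hh => inner_effect _ h hh _ r k) _
        (fun h hh => by rw [PySem.List.mem_pyRange_one] at hh; omega)
        (PySem.List.nodup_pyRange_one _ _) i]
    rw [getElem?_map_pyRange_zero', getElem?_map_pyRange_zero']
    by_cases hiH : (i : Int) < image_height
    · rw [if_pos hiH, if_pos hiH, Option.map_some]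
      by_cases hint : (i : Int) ∈ PySem.List.pyRange 2 (image_height - 2) 1
      · rw [if_pos hint, PySem.List.mem_pyRange_one] at *
        congr 1
        apply List.ext_getElem?
        intro j
        rw [foldl_pySetD_getElem? _ _ _
          (fun w hw => by rw [PySem.List.mem_pyRange_one] at hw; omega) j]
        rw [zrow_getElem?, getElem?_map_pyRange_zero']
        by_cases hjW : (j : Int) < image_width
        · rw [if_pos hjW, if_pos hjW]
          by_cases hjint : (j : Int) ∈ PySem.List.pyRange 2 (image_width - 2) 1
          · rw [PySem.List.mem_pyRange_one] at hjint
            rw [if_pos (by rwa [PySem.List.mem_pyRange_one]),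
              if_pos (by simpa [List.length_map, PySem.List.length_pyRange_one] using (by omega : j < (image_width - 0).toNat)),
              if_pos (by omega : 2 ≤ (i : Int) ∧ (i : Int) ≤ image_height - 3 ∧ 2 ≤ (j : Int) ∧ (j : Int) ≤ image_width - 3)]
            have hz : ∀ a : Int, 0 ≤ a → a < image_height →
                PySem.List.pyGetD (PySem.List.pyGetD
                  ((PySem.List.pyRange 0 image_height 1).map (fun h =>
                    (PySem.List.pyRange 0 image_width 1).map (fun w =>
                      if 2 ≤ w ∧ w ≤ image_width - 3 then
                        min (pvGet pixel_array h (w - 2)) (min (pvGet pixel_array h (w - 1))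
                          (min (pvGet pixel_array h w) (min (pvGet pixel_array h (w + 1))
                            (pvGet pixel_array h (w + 2)))))
                      else 0))) a []) (j : Int) 0
                  = hmin5 pixel_array a (j : Int) := by
              intro a ha0 haH
              rw [PySem.List.pyGetD_map_pyRange_of_nonneg _ _ _ _ ha0 haH,
                PySem.List.pyGetD_map_pyRange_of_nonneg _ _ _ _ (by omega) (by omega),
                if_pos (by omega : 2 ≤ (j : Int) ∧ (j : Int) ≤ image_width - 3)]
              rfl
            have hz1 := hz ((i : Int) - 2) (by omega) (by omega)
            have hz2 := hz ((i : Int) - 1) (by omega) (by omega)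
            have hz3 := hz (i : Int) (by omega) (by omega)
            have hz4 := hz ((i : Int) + 1) (by omega) (by omega)
            have hz5 := hz ((i : Int) + 2) (by omega) (by omega)
            simp only [valA_eq, hz1, hz2, hz3, hz4, hz5]
          · rw [if_neg hjint,
              if_neg (by rw [PySem.List.mem_pyRange_one] at hjint; omega :
                ¬(2 ≤ (i : Int) ∧ (i : Int) ≤ image_height - 3 ∧ 2 ≤ (j : Int) ∧ (j : Int) ≤ image_width - 3))]
        · rw [if_neg (by rw [PySem.List.mem_pyRange_one]; omega :
              ¬ ((j : Int) ∈ PySem.List.pyRange 2 (image_width - 2) 1)),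
            if_neg hjW, if_neg hjW]
      · rw [if_neg hint, PySem.List.mem_pyRange_one] at *
        congr 1
        apply List.ext_getElem?
        intro j
        rw [zrow_getElem?, getElem?_map_pyRange_zero']
        by_cases hjW : (j : Int) < image_width
        · rw [if_pos hjW, if_pos hjW,
            if_neg (by omega : ¬(2 ≤ (i : Int) ∧ (i : Int) ≤ image_height - 3 ∧ 2 ≤ (j : Int) ∧ (j : Int) ≤ image_width - 3))]
        · rw [if_neg hjW, if_neg hjW]
    · rw [if_neg hiH, if_neg hiH,
        if_neg (by rw [PySem.List.mem_pyRange_one]; omega)]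

-- ===== VERDICT (by name: the statement is the Claim_ definition above) =====
theorem applyErosion_spec : Claim_equal_applyErosion := by
  intro pixel_array image_width image_height _ _
  unfold Spec_applyErosion
  exact AB_eq pixel_array image_width image_height
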